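-- pv_equiv track=rewrite | github.com/LocusLontrime/Python | Agrorithms/Sorts/Shell_sort.py | find_shell_elements_hibbard
-- ===== SOURCE A (Python) =====
-- def find_shell_elements_hibbard(n: int):
--     elements = []
--     sequence_element, i = 1, 2
--     while sequence_element <= n:
--         elements.append(sequence_element)
--         sequence_element = 2 ** i - 1
--         i += 1
--     return elements
-- ===== SOURCE B (Python) =====
-- def find_shell_elements_hibbard(n: int):
--     # Closed form: count of Hibbard increments 2^i-1 <= n is floor(log2(n+1)),
--     # computed via bit_length, then emit them in one comprehension.
--     if n < 1:
--         return []
--     k = (n + 1).bit_length() - 1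
--     return [2 ** i - 1 for i in range(1, k + 1)]
-- ===== Notes on version B (the rewrite author's own statement) =====
-- stated objective: alternative
-- what changed: Replaces the test-and-append while loop by an upfront closed-form count k = (n+1).bit_length()-1 and a single comprehension [2**i-1 for i in range(1,k+1)].
import Mathlib
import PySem

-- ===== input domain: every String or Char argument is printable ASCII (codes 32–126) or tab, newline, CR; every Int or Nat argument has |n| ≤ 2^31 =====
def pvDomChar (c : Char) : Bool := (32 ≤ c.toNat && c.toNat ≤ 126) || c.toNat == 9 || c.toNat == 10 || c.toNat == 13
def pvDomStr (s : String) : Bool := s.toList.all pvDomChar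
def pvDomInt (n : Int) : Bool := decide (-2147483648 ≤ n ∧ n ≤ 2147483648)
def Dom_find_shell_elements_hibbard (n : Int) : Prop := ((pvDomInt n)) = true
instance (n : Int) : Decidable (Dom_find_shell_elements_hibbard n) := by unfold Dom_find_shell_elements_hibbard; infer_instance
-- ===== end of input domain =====

-- B replaces A's test-and-append while loop by a closed-form count via bit_length plus one comprehension (alternative decomposition; return value only, no side effects).

-- ===== PORT A =====
-- A's while loop: state (elements-so-far implicit in the cons, sequence_element, i).
-- The fuel bound 33 only makes the recursion total; on the stated domain |n| ≤ 2^31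
-- the loop runs at most 31 iterations, so the fuel is never exhausted there.
def loopA (n : Int) (elem : Int) (i : Nat) : Nat → List Int
  | 0 => []
  | fuel + 1 => if elem ≤ n then elem :: loopA n (2 ^ i - 1) (i + 1) fuel else []

def find_shell_elements_hibbard (n : Int) : List Int :=
  loopA n 1 2 33

-- ===== PORT B =====
-- Source B: if n < 1: []; k = (n+1).bit_length() - 1; [2**i - 1 for i in range(1, k+1)]
-- range(1, k+1) is ported as List.range k shifted by one inside the map (exact: k ≥ 0).
def find_shell_elements_hibbard_alt (n : Int) : List Int :=
  if n < 1 then []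
  else
    let k : Nat := PySem.Int.bitLength (n + 1) - 1
    (List.range k).map (fun j => (2 : Int) ^ (j + 1) - 1)

-- ===== PRECONDITION & SPEC =====
def Spec_find_shell_elements_hibbard (n : Int) (out : List Int) : Prop := out = find_shell_elements_hibbard_alt n
instance (n : Int) (out : List Int) : Decidable (Spec_find_shell_elements_hibbard n out) := by unfold Spec_find_shell_elements_hibbard; infer_instance

-- ===== CLAIM (what is proved, stated in full; the proofs are below) =====
def Claim_equal_find_shell_elements_hibbard : Prop := ∀ (n : Int), Dom_find_shell_elements_hibbard n → Spec_find_shell_elements_hibbard n (find_shell_elements_hibbard n)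

-- ===== LEMMAS AND PROOFS =====

-- The loop, started at exponent m ≥ 1 with element 2^m - 1, produces the tail of the
-- Hibbard sequence, provided K characterises membership (2^j - 1 ≤ n ↔ j ≤ K) and
-- there is enough fuel.
lemma loopA_eq (n : Int) (K : Nat) (hK : ∀ j : Nat, ((2 : Int) ^ j - 1 ≤ n ↔ j ≤ K)) :
    ∀ (fuel m : Nat), 1 ≤ m → K + 1 - m ≤ fuel →
      loopA n (2 ^ m - 1) (m + 1) fuel
        = (List.range (K + 1 - m)).map (fun j => (2 : Int) ^ (m + j) - 1) := by
  intro fuel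
  induction fuel with
  | zero =>
      intro m hm hfuel
      have h0 : K + 1 - m = 0 := Nat.le_zero.mp hfuel
      simp [loopA, h0]
  | succ fuel ih =>
      intro m hm hfuel
      by_cases hle : (2 : Int) ^ m - 1 ≤ n
      · have hmK : m ≤ K := (hK m).mp hle
        have hsucc : K + 1 - m = (K - m) + 1 := by omega
        have ihm := ih (m + 1) (by omega) (by omega)
        have hKm : K + 1 - (m + 1) = K - m := by omega
        rw [hKm] at ihm
        simp only [loopA, if_pos hle]
        rw [ihm, hsucc, List.range_succ_eq_map, List.map_cons, List.map_map]
        congr 1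
        apply List.map_congr_left
        intro j _
        have h' : m + 1 + j = m + Nat.succ j := by omega
        simp [Function.comp, h']
      · have hmK : ¬ m ≤ K := fun h => hle (hK m |>.mpr h)
        have h0 : K + 1 - m = 0 := by omega
        simp only [loopA]
        rw [if_neg hle]
        simp [h0]

-- ===== VERDICT (by name: the statement is the Claim_ definition above) =====
theorem find_shell_elements_hibbard_spec : Claim_equal_find_shell_elements_hibbard := by
  intro n hdom
  unfold Spec_find_shell_elements_hibbard find_shell_elements_hibbard find_shell_elements_hibbard_alt
  by_cases hlt : n < 1
  · have h1 : ¬ ((1 : Int) ≤ n) := by omega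
    simp [loopA, h1, hlt]
  · have hn1 : (1 : Int) ≤ n := by omega
    have hpos : (0 : Int) < n + 1 := by omega
    have hne : n + 1 ≠ 0 := by omega
    set B := PySem.Int.bitLength (n + 1) with hB
    have hub : (n + 1).natAbs < 2 ^ B := PySem.Int.lt_two_pow_bitLength (n + 1)
    have hlb : 2 ^ (B - 1) ≤ (n + 1).natAbs := PySem.Int.two_pow_bitLength_le (n + 1) hne
    have habs : ((n + 1).natAbs : Int) = n + 1 := Int.natAbs_of_nonneg (by omega)
    -- B ≥ 2 since n + 1 ≥ 2
    have hB2 : 2 ≤ B := by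
      by_contra h
      interval_cases B <;> omega
    set K : Nat := B - 1 with hKdef
    have hBK : B = K + 1 := by omega
    have hubI : n + 1 < (2 : Int) ^ (K + 1) := by
      have := hub
      rw [hBK] at this
      have : ((n + 1).natAbs : Int) < ((2 ^ (K + 1) : Nat) : Int) := by exact_mod_cast this
      rw [habs] at this
      simpa using this
    have hlbI : (2 : Int) ^ K ≤ n + 1 := by
      have h' : ((2 ^ K : Nat) : Int) ≤ ((n + 1).natAbs : Int) := by exact_mod_cast hlb
      rw [habs] at h'
      simpa using h'
    have hK : ∀ j : Nat, ((2 : Int) ^ j - 1 ≤ n ↔ j ≤ K) := by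
      intro j
      constructor
      · intro hj
        by_contra h
        have hjK : K + 1 ≤ j := by omega
        have : (2 : Int) ^ (K + 1) ≤ 2 ^ j := pow_le_pow_right₀ (by norm_num) hjK
        omega
      · intro hj
        have : (2 : Int) ^ j ≤ 2 ^ K := pow_le_pow_right₀ (by norm_num) hj
        omega
    -- enough fuel: K ≤ 32 since n ≤ 2^31
    have hnle : n ≤ 2147483648 := by
      have := hdom
      unfold Dom_find_shell_elements_hibbard pvDomInt at this
      simpa using (of_decide_eq_true this).2
    have hKle : K ≤ 32 := by
      by_contra h
      have h33 : 33 ≤ K := by omega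
      have : (2 : Int) ^ 33 ≤ 2 ^ K := pow_le_pow_right₀ (by norm_num) h33
      have : (2 : Int) ^ 33 ≤ n + 1 := le_trans this hlbI
      norm_num at this
      omega
    have hmain := loopA_eq n K hK 33 1 (le_refl 1) (by omega)
    norm_num at hmain
    rw [hmain, if_neg (by omega)]
    apply List.map_congr_left
    intro j _
    ring_nf
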